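-- pv_equiv track=rewrite | github.com/IBN5101/EXPx-AoC2023 | day01/day01p2.py | replace_last_str_digits
-- ===== SOURCE A (Python) =====
-- str_digits = {
--     "one": 1,
--     "two": 2,
--     "three": 3,
--     "four": 4,
--     "five": 5,
--     "six": 6,
--     "seven": 7,
--     "eight": 8,
--     "nine": 9,
-- }
--
-- def replace_last_str_digits(string:str):
--     highest_index = -1
--     highest_str_digit = ""
--     flag = False
--     for str_digit in str_digits.keys():
--         if str_digit in string:
--             current_index = string.rfind(str_digit)
--             if current_index > highest_index:
--                 highest_index = current_index
--                 highest_str_digit = str_digit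
--             flag = True
--
--     if flag:
--         l_index = highest_index
--         r_index = highest_index + len(highest_str_digit)
--         new_string = string[:l_index] + \
--             str(str_digits[highest_str_digit]) + \
--             string[l_index:]
--         return new_string
--     else:
--         return string
-- ===== SOURCE B (Python) =====
-- str_digits = {
--     "one": 1, "two": 2, "three": 3, "four": 4, "five": 5,
--     "six": 6, "seven": 7, "eight": 8, "nine": 9,
-- }
--
-- def replace_last_str_digits(string: str):
--     # Scan positions right-to-left; the first position where any digit word
--     # starts is the last occurrence overall.
--     for i in range(len(string) - 1, -1, -1):
--         for word, value in str_digits.items():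
--             if string.startswith(word, i):
--                 return string[:i] + str(value) + string[i:]
--     return string
-- ===== Notes on version B (the rewrite author's own statement) =====
-- stated objective: alternative
-- what changed: B replaces A's per-word rfind-and-maximize fold with a single right-to-left scan over string positions that returns at the first position where any digit word starts.
import Mathlib
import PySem

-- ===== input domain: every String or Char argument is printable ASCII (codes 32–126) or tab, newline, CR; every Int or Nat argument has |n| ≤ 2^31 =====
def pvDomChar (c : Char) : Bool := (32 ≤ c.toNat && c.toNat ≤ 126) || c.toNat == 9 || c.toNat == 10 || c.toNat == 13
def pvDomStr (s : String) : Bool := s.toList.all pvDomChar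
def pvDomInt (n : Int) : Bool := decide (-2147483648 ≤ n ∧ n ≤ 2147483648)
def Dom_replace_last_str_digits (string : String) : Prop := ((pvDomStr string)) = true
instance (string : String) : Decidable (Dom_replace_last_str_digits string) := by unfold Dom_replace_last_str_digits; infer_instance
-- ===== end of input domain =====

-- B scans string positions right to left and returns at the first position where a digit word
-- starts, instead of A's per-word rfind maximization (objective: alternative decomposition).

-- ===== PORT A =====
def str_digits : List (String × Int) :=
  [("one", 1), ("two", 2), ("three", 3), ("four", 4), ("five", 5),
   ("six", 6), ("seven", 7), ("eight", 8), ("nine", 9)]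

def stepA (s : List Char) (acc : Int × String × Bool) (kv : String × Int) : Int × String × Bool :=
  if PySem.Chars.isIn kv.1.toList s then
    let ci := PySem.Chars.rfind s kv.1.toList
    if ci > acc.1 then (ci, kv.1, true) else (acc.1, acc.2.1, true)
  else acc

def replace_last_str_digits (string : String) : String :=
  let s := string.toList
  let st := str_digits.foldl (stepA s) (-1, "", false)
  if st.2.2 then
    String.mk (PySem.Chars.slice s none (some st.1)
      ++ PySem.Int.toChars (((PySem.Dict.ofList str_digits).get? st.2.1).getD 0)
      ++ PySem.Chars.slice s (some st.1) none)
  else string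

-- ===== PORT B =====
-- string.startswith(word, i) with 0 ≤ i < len(string) is exactly isPrefixOf on s.drop i
def bFind (s : List Char) (i : Nat) : Option Int :=
  str_digits.findSome? (fun kv =>
    if PySem.Chars.startswith (s.drop i) kv.1.toList then some kv.2 else none)

def bGo (s : List Char) : Nat → Option (Nat × Int)
  | 0 => none
  | i + 1 =>
    match bFind s i with
    | some v => some (i, v)
    | none => bGo s i

def replace_last_str_digits_alt (string : String) : String :=
  let s := string.toList
  match bGo s s.length with
  | some (i, v) => String.mk (s.take i ++ PySem.Int.toChars v ++ s.drop i)
  | none => string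

-- ===== PRECONDITION & SPEC =====
def Spec_replace_last_str_digits (string : String) (out : String) : Prop := out = replace_last_str_digits_alt string
instance (string : String) (out : String) : Decidable (Spec_replace_last_str_digits string out) := by unfold Spec_replace_last_str_digits; infer_instance

-- ===== CLAIM (what is proved, stated in full; the proofs are below) =====
def Claim_equal_replace_last_str_digits : Prop := ∀ (string : String), Dom_replace_last_str_digits string → Spec_replace_last_str_digits string (replace_last_str_digits string)

-- ===== LEMMAS AND PROOFS =====

-- the three concrete facts about the 9 digit words
theorem words_prefix_unique : ∀ kv ∈ str_digits, ∀ kv' ∈ str_digits,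
    kv.1.toList <+: kv'.1.toList → kv = kv' := by
  intro kv h kv' h'
  simp only [str_digits, List.mem_cons, List.not_mem_nil, or_false] at h h'
  rcases h with rfl|rfl|rfl|rfl|rfl|rfl|rfl|rfl|rfl <;>
    rcases h' with rfl|rfl|rfl|rfl|rfl|rfl|rfl|rfl|rfl <;> decide

theorem words_ne_nil : ∀ kv ∈ str_digits, kv.1.toList ≠ [] := by
  intro kv h
  simp only [str_digits, List.mem_cons, List.not_mem_nil, or_false] at h
  rcases h with rfl|rfl|rfl|rfl|rfl|rfl|rfl|rfl|rfl <;> decide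

theorem dict_lookup : ∀ kv ∈ str_digits,
    ((PySem.Dict.ofList str_digits).get? kv.1).getD 0 = kv.2 := by
  intro kv h
  simp only [str_digits, List.mem_cons, List.not_mem_nil, or_false] at h
  rcases h with rfl|rfl|rfl|rfl|rfl|rfl|rfl|rfl|rfl <;> decide

-- characterization of Python's rfind scan
theorem rfindGo_zero (s sub : List Char) :
    PySem.Chars.rfind.go s sub 0 = if sub.isPrefixOf s then 0 else -1 := rfl

theorem rfindGo_succ (s sub : List Char) (j : Nat) :
    PySem.Chars.rfind.go s sub (j + 1) =
      if sub.isPrefixOf (List.drop (j + 1) s) then ((j : Int) + 1)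
      else PySem.Chars.rfind.go s sub j := rfl

theorem rfindGo_spec (s sub : List Char) (j : Nat) :
    (PySem.Chars.rfind.go s sub j = -1 ∧ ∀ i ≤ j, ¬ sub.isPrefixOf (s.drop i) = true)
    ∨ ∃ k : Nat, k ≤ j ∧ PySem.Chars.rfind.go s sub j = (k : Int) ∧
        sub.isPrefixOf (s.drop k) = true ∧
        ∀ i ≤ j, sub.isPrefixOf (s.drop i) = true → i ≤ k := by
  induction j with
  | zero =>
    rw [rfindGo_zero]
    by_cases h : sub.isPrefixOf (s.drop 0) = true
    · have h' : sub.isPrefixOf s = true := h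
      right
      exact ⟨0, le_refl _, by rw [if_pos h']; rfl, h, fun i hi _ => hi⟩
    · have h' : ¬ sub.isPrefixOf s = true := h
      left
      refine ⟨by rw [if_neg h'], ?_⟩
      intro i hi
      have : i = 0 := Nat.le_zero.mp hi
      subst this
      exact h
  | succ j ih =>
    rw [rfindGo_succ]
    by_cases h : sub.isPrefixOf (List.drop (j + 1) s) = true
    · right
      refine ⟨j + 1, le_refl _, by rw [if_pos h]; push_cast; ring, h, fun i hi _ => hi⟩
    · rw [if_neg h]
      rcases ih with ⟨h1, h2⟩ | ⟨k, hk, hgo', hpref, hmax⟩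
      · left
        refine ⟨h1, ?_⟩
        intro i hi
        rcases Nat.lt_succ_iff_lt_or_eq.mp (Nat.lt_succ_of_le hi) with hlt | rfl
        · exact h2 i (by omega)
        · exact h
      · right
        refine ⟨k, by omega, hgo', hpref, ?_⟩
        intro i hi hp
        rcases Nat.lt_succ_iff_lt_or_eq.mp (Nat.lt_succ_of_le hi) with hlt | rfl
        · exact hmax i (by omega) hp
        · exact absurd hp h

theorem rfind_spec_of_isIn (s sub : List Char) (h : PySem.Chars.isIn sub s = true)
    (hne : sub ≠ []) :
    ∃ k : Nat, k < s.length ∧ PySem.Chars.rfind s sub = (k : Int) ∧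
      sub.isPrefixOf (s.drop k) = true ∧
      ∀ i : Nat, sub.isPrefixOf (s.drop i) = true → i ≤ k := by
  have hex : ∃ j, sub <+: s.drop j := (PySem.Chars.exists_prefix_drop_iff_isIn sub s).mpr h
  obtain ⟨j, hj⟩ := hex
  have hjle : j ≤ s.length := by
    by_contra hgt
    have : s.drop j = [] := List.drop_eq_nil_of_le (by omega)
    rw [this] at hj
    exact hne (List.prefix_nil.mp hj)
  have hspec := rfindGo_spec s sub s.length
  rcases hspec with ⟨_, hall⟩ | ⟨k, hk, hgo, hpref, hmax⟩
  · exact absurd (List.isPrefixOf_iff_prefix.mpr hj) (hall j hjle)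
  · have hklt : k < s.length := by
      have hp : sub <+: s.drop k := List.isPrefixOf_iff_prefix.mp hpref
      have hlen : sub.length ≤ (s.drop k).length := hp.length_le
      have : 1 ≤ sub.length := by
        cases sub with
        | nil => exact absurd rfl hne
        | cons a l => simp
      simp only [List.length_drop] at hlen
      omega
    refine ⟨k, hklt, hgo, hpref, ?_⟩
    intro i hp
    by_cases hile : i ≤ s.length
    · exact hmax i hile hp
    · exfalso
      have : s.drop i = [] := List.drop_eq_nil_of_le (by omega)
      rw [this] at hp
      exact hne (List.prefix_nil.mp (List.isPrefixOf_iff_prefix.mp hp))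

-- invariant for A's fold
def GoodSt (s : List Char) (ws : List (String × Int)) (st : Int × String × Bool) : Prop :=
  (st = (-1, "", false) ∧ ∀ kv ∈ ws, PySem.Chars.isIn kv.1.toList s = false)
  ∨ (st.2.2 = true ∧ (∃ kv ∈ ws, st.2.1 = kv.1) ∧
      PySem.Chars.isIn st.2.1.toList s = true ∧
      st.1 = PySem.Chars.rfind s st.2.1.toList ∧ 0 ≤ st.1 ∧
      ∀ kv ∈ ws, PySem.Chars.isIn kv.1.toList s = true →
        PySem.Chars.rfind s kv.1.toList ≤ st.1)

theorem foldA_gen (s : List Char) (ws : List (String × Int))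
    (hws : ∀ kv ∈ ws, kv.1.toList ≠ []) :
    GoodSt s ws (ws.foldl (stepA s) (-1, "", false)) := by
  induction ws using List.reverseRecOn with
  | nil => left; simp
  | append_singleton ws kv ih =>
    have hkv : kv.1.toList ≠ [] := hws kv (by simp)
    have hws' : ∀ kv' ∈ ws, kv'.1.toList ≠ [] := fun kv' h => hws kv' (by simp [h])
    have ih' := ih hws'
    rw [List.foldl_append]
    simp only [List.foldl_cons, List.foldl_nil]
    set st := ws.foldl (stepA s) (-1, "", false) with hst
    by_cases hin : PySem.Chars.isIn kv.1.toList s = true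
    · obtain ⟨k, _, hrf, _, _⟩ := rfind_spec_of_isIn s kv.1.toList hin hkv
      have hrf0 : 0 ≤ PySem.Chars.rfind s kv.1.toList := by
        rw [hrf]; exact Int.natCast_nonneg k
      rcases ih' with ⟨hst0, hall⟩ | ⟨hfl, ⟨kvh, hmem, hhw⟩, hinh, hhi, hhi0, hmax⟩
      · have hgt : PySem.Chars.rfind s kv.1.toList > (-1 : Int) := by omega
        have hstep : stepA s st kv = (PySem.Chars.rfind s kv.1.toList, kv.1, true) := by
          rw [hst0]; simp [stepA, hin, hgt]
        rw [hstep]; right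
        refine ⟨rfl, ⟨kv, by simp, rfl⟩, hin, rfl, hrf0, ?_⟩
        intro kv' hkv' hin'
        rcases List.mem_append.mp hkv' with hk | hk
        · exact absurd hin' (by simp [hall kv' hk])
        · simp at hk; subst hk; exact le_refl _
      · by_cases hgt : PySem.Chars.rfind s kv.1.toList > st.1
        · have hstep : stepA s st kv = (PySem.Chars.rfind s kv.1.toList, kv.1, true) := by
            simp [stepA, hin, hgt]
          rw [hstep]; right
          refine ⟨rfl, ⟨kv, by simp, rfl⟩, hin, rfl, hrf0, ?_⟩
          intro kv' hkv' hin'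
          rcases List.mem_append.mp hkv' with hk | hk
          · exact le_of_lt (lt_of_le_of_lt (hmax kv' hk hin') hgt)
          · simp at hk; subst hk; exact le_refl _
        · have hstep : stepA s st kv = (st.1, st.2.1, true) := by
            simp [stepA, hin, hgt]
          rw [hstep]; right
          refine ⟨rfl, ⟨kvh, List.mem_append.mpr (Or.inl hmem), hhw⟩, hinh, hhi, hhi0, ?_⟩
          intro kv' hkv' hin'
          rcases List.mem_append.mp hkv' with hk | hk
          · exact hmax kv' hk hin'
          · simp at hk; subst hk; omega
    · have hin' : PySem.Chars.isIn kv.1.toList s = false := by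
        cases h : PySem.Chars.isIn kv.1.toList s
        · rfl
        · exact absurd h hin
      have hstep : stepA s st kv = st := by simp [stepA, hin']
      rw [hstep]
      rcases ih' with ⟨hst0, hall⟩ | ⟨hfl, ⟨kvh, hmem, hhw⟩, hinh, hhi, hhi0, hmax⟩
      · left
        refine ⟨hst0, ?_⟩
        intro kv' hkv'
        rcases List.mem_append.mp hkv' with hk | hk
        · exact hall kv' hk
        · simp at hk; subst hk; exact hin'
      · right
        refine ⟨hfl, ⟨kvh, List.mem_append.mpr (Or.inl hmem), hhw⟩, hinh, hhi, hhi0, ?_⟩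
        intro kv' hkv' hin''
        rcases List.mem_append.mp hkv' with hk | hk
        · exact hmax kv' hk hin''
        · simp at hk; subst hk; simp [hin'] at hin''

-- characterization of B's scan
theorem bFind_none_iff (s : List Char) (i : Nat) :
    bFind s i = none ↔ ∀ kv ∈ str_digits, ¬ kv.1.toList.isPrefixOf (s.drop i) = true := by
  simp only [bFind, List.findSome?_eq_none_iff, PySem.Chars.startswith]
  constructor
  · intro h kv hkv hp
    have := h kv hkv
    simp [hp] at this
  · intro h kv hkv
    simp [h kv hkv]

theorem bGo_succ (s : List Char) (i : Nat) :
    bGo s (i + 1) = match bFind s i with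
      | some v => some (i, v)
      | none => bGo s i := rfl

theorem bGo_spec (s : List Char) (j : Nat) :
    (bGo s j = none ∧ ∀ i < j, bFind s i = none)
    ∨ ∃ k v, k < j ∧ bGo s j = some (k, v) ∧ bFind s k = some v ∧
        ∀ i < j, bFind s i ≠ none → i ≤ k := by
  induction j with
  | zero => left; exact ⟨rfl, by omega⟩
  | succ j ih =>
    cases hf : bFind s j with
    | some v =>
      right
      refine ⟨j, v, by omega, ?_, hf, fun i hi _ => by omega⟩
      rw [bGo_succ, hf]
    | none =>
      have hgo : bGo s (j + 1) = bGo s j := by rw [bGo_succ, hf]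
      rcases ih with ⟨h1, h2⟩ | ⟨k, v, hk, hgo', hfk, hmax⟩
      · left
        refine ⟨by rw [hgo]; exact h1, ?_⟩
        intro i hi
        rcases Nat.lt_succ_iff_lt_or_eq.mp hi with hlt | rfl
        · exact h2 i hlt
        · exact hf
      · right
        refine ⟨k, v, by omega, by rw [hgo]; exact hgo', hfk, ?_⟩
        intro i hi hne
        rcases Nat.lt_succ_iff_lt_or_eq.mp hi with hlt | rfl
        · exact hmax i hlt hne
        · exact absurd hf hne

theorem findSome?_unique (l : List (String × Int)) (t : List Char) (w : String) (v : Int)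
    (hmem : (w, v) ∈ l) (hw : w.toList.isPrefixOf t = true)
    (huniq : ∀ kv ∈ l, kv.1.toList.isPrefixOf t = true → kv = (w, v)) :
    l.findSome? (fun kv => if PySem.Chars.startswith t kv.1.toList then some kv.2 else none)
      = some v := by
  induction l with
  | nil => simp at hmem
  | cons kv l ih =>
    simp only [List.findSome?_cons]
    by_cases hp : PySem.Chars.startswith t kv.1.toList = true
    · have hkvw : kv = (w, v) := huniq kv (by simp) (by simpa [PySem.Chars.startswith] using hp)
      have h2 : kv.2 = v := by rw [hkvw]
      simp [hp, h2]
    · have hp' : PySem.Chars.startswith t kv.1.toList = false := by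
        cases h : PySem.Chars.startswith t kv.1.toList
        · rfl
        · exact absurd h hp
      simp only [hp', Bool.false_eq_true, if_false]
      have hmem' : (w, v) ∈ l := by
        rcases List.mem_cons.mp hmem with rfl | h
        · exact absurd (by simpa [PySem.Chars.startswith] using hw) hp
        · exact h
      exact ih hmem' (fun kv' h hp'' => huniq kv' (by simp [h]) hp'')

-- ===== VERDICT (by name: the statement is the Claim_ definition above) =====
theorem replace_last_str_digits_spec : Claim_equal_replace_last_str_digits := by
  intro string _
  unfold Spec_replace_last_str_digits
  simp only [replace_last_str_digits, replace_last_str_digits_alt]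
  set s := string.toList with hs
  have hG := foldA_gen s str_digits words_ne_nil
  set st := str_digits.foldl (stepA s) (-1, "", false) with hstdef
  rcases hG with ⟨hst0, hall⟩ | ⟨hfl, ⟨kvh, hmem, hhw⟩, hinh, hhi, hhi0, hmaxA⟩
  · -- no word occurs: both return the original string
    have hbgo : bGo s s.length = none := by
      rcases bGo_spec s s.length with ⟨h1, _⟩ | ⟨k, v, hk, _, hfk, _⟩
      · exact h1
      · exfalso
        have hex : ∃ kv ∈ str_digits, kv.1.toList.isPrefixOf (List.drop k s) = true := by
          by_contra hno
          simp only [not_exists, not_and] at hno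
          have hno : ∀ kv ∈ str_digits, ¬kv.1.toList.isPrefixOf (List.drop k s) = true := fun kv hkv => hno kv hkv
          have hnone : bFind s k = none := (bFind_none_iff s k).mpr hno
          simp [hnone] at hfk
        obtain ⟨kv, hkv, hp⟩ := hex
        have hin : PySem.Chars.isIn kv.1.toList s = true :=
          (PySem.Chars.exists_prefix_drop_iff_isIn kv.1.toList s).mp
            ⟨k, List.isPrefixOf_iff_prefix.mp hp⟩
        simp [hall kv hkv] at hin
    rw [hst0, hbgo]
    simp
  · -- some word occurs
    have hne : kvh.1.toList ≠ [] := words_ne_nil kvh hmem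
    rw [hhw] at hinh hhi
    obtain ⟨k, hklt, hrf, hprefk, hmaxk⟩ := rfind_spec_of_isIn s kvh.1.toList hinh hne
    have hhik : st.1 = (k : Int) := by rw [hhi, hrf]
    -- B's scan finds exactly position k with kvh's value
    have hfindk : bFind s k = some kvh.2 := by
      unfold bFind
      apply findSome?_unique str_digits (s.drop k) kvh.1 kvh.2 (by simpa using hmem) hprefk
      intro kv hkv hp
      have hcmp : kv.1.toList <+: kvh.1.toList ∨ kvh.1.toList <+: kv.1.toList :=
        List.prefix_or_prefix_of_prefix (List.isPrefixOf_iff_prefix.mp hp)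
          (List.isPrefixOf_iff_prefix.mp hprefk)
      rcases hcmp with hc | hc
      · have := words_prefix_unique kv hkv kvh hmem hc
        rw [this]
      · have := words_prefix_unique kvh hmem kv hkv hc
        rw [← this]
    rcases bGo_spec s s.length with ⟨_, h2⟩ | ⟨k', v, hk', hgo, hfk', hmax'⟩
    · exfalso
      have := h2 k hklt
      simp [this] at hfindk
    · have hkk' : k = k' := by
        have h1 : k ≤ k' := hmax' k hklt (by simp [hfindk])
        have h2 : k' ≤ k := by
          obtain ⟨kv, hkv, hpv⟩ := List.exists_of_findSome?_eq_some hfk'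
          have hp : kv.1.toList.isPrefixOf (s.drop k') = true := by
            by_cases h : PySem.Chars.startswith (s.drop k') kv.1.toList = true
            · simpa [PySem.Chars.startswith] using h
            · simp [h] at hpv
          have hin : PySem.Chars.isIn kv.1.toList s = true :=
            (PySem.Chars.exists_prefix_drop_iff_isIn kv.1.toList s).mp
              ⟨k', List.isPrefixOf_iff_prefix.mp hp⟩
          obtain ⟨m, _, hrfm, _, hmaxm⟩ :=
            rfind_spec_of_isIn s kv.1.toList hin (words_ne_nil kv hkv)
          have h1 : (k' : Nat) ≤ m := hmaxm k' hp
          have h2 : PySem.Chars.rfind s kv.1.toList ≤ st.1 := hmaxA kv hkv hin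
          rw [hrfm, hhik] at h2
          omega
        omega
      have hv : v = kvh.2 := by
        rw [← hkk'] at hfk'
        rw [hfindk] at hfk'
        exact (Option.some_inj.mp hfk').symm
      have hd : ((PySem.Dict.ofList str_digits).get? kvh.1).getD 0 = kvh.2 := dict_lookup kvh hmem
      rw [hgo]
      simp [hfl, hhik, hhw, ← hkk', hv, hd, PySem.Chars.slice_eq_listSlice,
        PySem.List.slice_to_natCast, PySem.List.slice_from_natCast]
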